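-- pv_equiv track=rewrite | github.com/mgmacleod/Modeling-Self-Reference | n-link-analysis/scripts/dash-tributary-viewer.py | _pick_directions_orthogonal
-- ===== SOURCE A (Python) =====
-- def _pick_directions_orthogonal(k: int) -> list[tuple[int, int, int]]:
--     """Up to 4 orthogonal directions in the XY plane, then repeat."""
--     base = [(1, 0, 0), (-1, 0, 0), (0, 1, 0), (0, -1, 0)]
--     if k <= 0:
--         return []
--     out: list[tuple[int, int, int]] = []
--     for i in range(k):
--         out.append(base[i % len(base)])
--     return out
-- ===== SOURCE B (Python) =====
-- def _pick_directions_orthogonal(k: int) -> list[tuple[int, int, int]]: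
--     """Up to 4 orthogonal directions in the XY plane, then repeat."""
--     base = [(1, 0, 0), (-1, 0, 0), (0, 1, 0), (0, -1, 0)]
--     if k <= 0:
--         return []
--     reps = k // len(base) + 1
--     return (base * reps)[:k]
-- ===== Notes on version B (the rewrite author's own statement) =====
-- stated objective: idiomatic
-- what changed: Replaces the per-element loop with modulo indexing by bulk list replication (base * reps) truncated with a slice to length k.
import Mathlib
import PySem

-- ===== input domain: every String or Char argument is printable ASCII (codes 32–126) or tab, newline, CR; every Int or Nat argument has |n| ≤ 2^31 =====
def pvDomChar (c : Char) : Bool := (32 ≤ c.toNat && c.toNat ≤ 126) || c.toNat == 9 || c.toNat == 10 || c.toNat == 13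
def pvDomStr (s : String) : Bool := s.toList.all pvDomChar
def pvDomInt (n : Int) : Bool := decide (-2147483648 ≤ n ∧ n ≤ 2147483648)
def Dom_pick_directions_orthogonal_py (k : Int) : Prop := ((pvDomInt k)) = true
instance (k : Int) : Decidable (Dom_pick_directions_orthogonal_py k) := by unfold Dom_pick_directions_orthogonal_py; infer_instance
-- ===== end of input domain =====

-- ===== PORT A =====
-- B replaces A's per-element loop (append base[i % 4] for each i in range(k)) by bulk
-- replication of the 4-element base list truncated with a slice; idiomatic, same cost.
def pvBase : List (Int × Int × Int) := [(1, 0, 0), (-1, 0, 0), (0, 1, 0), (0, -1, 0)]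

def pick_directions_orthogonal_py (k : Int) : List (Int × Int × Int) :=
  if k ≤ 0 then []
  else
    -- for i in range(k): out.append(base[i % len(base)])
    -- base[i % 4]: the index 0 ≤ i % 4 < 4 is always in range, so pyGetD is exact here
    (PySem.List.pyRange 0 k 1).foldl
      (fun out i => out ++ [PySem.List.pyGetD pvBase (PySem.Int.mod i 4) (0, 0, 0)]) []

-- ===== PORT B =====
def pick_directions_orthogonal_py_alt (k : Int) : List (Int × Int × Int) :=
  if k ≤ 0 then []
  else
    -- reps = k // 4 + 1; return (base * reps)[:k]   (k > 0, so the slice [:k] is take k)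
    ((List.replicate (PySem.Int.floordiv k 4 + 1).toNat pvBase).flatten).take k.toNat

-- ===== PRECONDITION & SPEC =====
def Spec_pick_directions_orthogonal_py (k : Int) (out : List (Int × Int × Int)) : Prop := out = pick_directions_orthogonal_py_alt k
instance (k : Int) (out : List (Int × Int × Int)) : Decidable (Spec_pick_directions_orthogonal_py k out) := by unfold Spec_pick_directions_orthogonal_py; infer_instance

-- ===== CLAIM (what is proved, stated in full; the proofs are below) =====
def Claim_equal_pick_directions_orthogonal_py : Prop := ∀ (k : Int), Dom_pick_directions_orthogonal_py k → Spec_pick_directions_orthogonal_py k (pick_directions_orthogonal_py k)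

-- ===== LEMMAS AND PROOFS =====

-- The replicated-and-flattened base list, elementwise: entry j is base[j % 4].
lemma pv_rep (m : Nat) :
    (List.replicate m pvBase).flatten
      = (List.range (4 * m)).map (fun j => pvBase.getD (j % 4) (0, 0, 0)) := by
  induction m with
  | zero => simp
  | succ m ih =>
      have h4 : 4 * (m + 1) = 4 + 4 * m := by ring
      rw [List.replicate_succ, List.flatten_cons, ih, h4, List.range_add, List.map_append,
        List.map_map]
      congr 1
      · apply List.map_congr_left
        intro j _
        simp

theorem pick_directions_orthogonal_py_spec : Claim_equal_pick_directions_orthogonal_py := by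
  intro k _
  unfold Spec_pick_directions_orthogonal_py pick_directions_orthogonal_py
    pick_directions_orthogonal_py_alt
  by_cases hk : k ≤ 0
  · simp [hk]
  · simp only [hk, if_false]
    obtain ⟨n, rfl⟩ : ∃ n : Nat, k = (n : Int) := ⟨k.toNat, by omega⟩
    rw [PySem.List.pyRange_zero_natCast, List.foldl_map,
      PySem.List.foldl_append_singleton_eq_map, List.nil_append]
    rw [pv_rep]
    have hfd : PySem.Int.floordiv (n : Int) 4 = ((n / 4 : Nat) : Int) :=
      PySem.Int.floordiv_natCast n 4
    rw [hfd]
    have ht : (((n / 4 : Nat) : Int) + 1).toNat = n / 4 + 1 := by omega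
    rw [ht, ← List.map_take, List.take_range]
    have hmin : min ((n : Int).toNat) (4 * (n / 4 + 1)) = n := by omega
    rw [hmin]
    apply List.map_congr_left
    intro j _
    have hm : PySem.Int.mod ((j : Nat) : Int) 4 = ((j % 4 : Nat) : Int) :=
      PySem.Int.mod_natCast j 4
    rw [hm, PySem.List.pyGetD_natCast]
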